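-- pv_equiv track=rewrite | github.com/SynAeri/Unihack2026 | backend/python/utils.py | validate_food
-- ===== SOURCE A (Python) =====
-- from typing import Dict, List, Tuple
--
-- def validate_food(food_class: str, labels: List[str], slime_type: str) -> Tuple[bool, str]:
--
--     # Validate if the scanned food is acceptable for the slime.
--     # Returns (is_valid, message) tuple.
--
--     # All slimes accept food and drink
--     acceptable_classes = ["food", "drink", "snack", "beverage"]
--
--     # Check if food_class is acceptable
--     if food_class.lower() in acceptable_classes:
--         # Scholar slimes prefer coffee/tea
--         if slime_type == "scholar":
--             if any(label.lower() in ["coffee", "tea", "book"] for label in labels):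
--                 return True, "The slime happily consumed it while studying!"
--             else:
--                 return True, "The slime ate it, though it would prefer coffee or tea."
--
--         # Glutton slimes love all food
--         elif slime_type == "glutton":
--             return True, "The slime devoured it with joy!"
--
--         # Athlete slimes prefer healthy food
--         elif slime_type == "athlete":
--             if any(label.lower() in ["fruit", "vegetable", "water", "healthy"] for label in labels):
--                 return True, "The slime gratefully ate the healthy snack!"
--             else:
--                 return True, "The slime ate it, but prefers healthier options."
--
--         # Wanderer slimes accept everything
--         else:
--             return True, "The slime happily ate it."
--
--     # Not food
--     return False, "That's not food! The slime looked confused."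
-- ===== SOURCE B (Python) =====
-- _TABLE = {
--     "scholar": (("coffee", "tea", "book"),
--                 "The slime happily consumed it while studying!",
--                 "The slime ate it, though it would prefer coffee or tea."),
--     "glutton": ((),
--                 "The slime devoured it with joy!",
--                 "The slime devoured it with joy!"),
--     "athlete": (("fruit", "vegetable", "water", "healthy"),
--                 "The slime gratefully ate the healthy snack!",
--                 "The slime ate it, but prefers healthier options."),
-- }
-- _WANDERER = ((), "The slime happily ate it.", "The slime happily ate it.")
--
-- def validate_food(food_class, labels, slime_type):
--     if food_class.lower() not in ("food", "drink", "snack", "beverage"):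
--         return False, "That's not food! The slime looked confused."
--     prefs, happy, default = _TABLE.get(slime_type, _WANDERER)
--     # build the lowercase label set once, then scan the (constant) preference
--     # list against it -- the reverse of A's label-by-label scan
--     seen = {label.lower() for label in labels}
--     return True, (happy if any(p in seen for p in prefs) else default)
-- ===== Notes on version B (the rewrite author's own statement) =====
-- stated objective: simpler
-- what changed: Replaces the four-way if/elif cascade with a table lookup and reverses the matching scan: instead of testing each label's lowercase against a per-branch preference list, B builds the lowercase label set once and scans the constant preference list against that set.
import Mathlib
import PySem

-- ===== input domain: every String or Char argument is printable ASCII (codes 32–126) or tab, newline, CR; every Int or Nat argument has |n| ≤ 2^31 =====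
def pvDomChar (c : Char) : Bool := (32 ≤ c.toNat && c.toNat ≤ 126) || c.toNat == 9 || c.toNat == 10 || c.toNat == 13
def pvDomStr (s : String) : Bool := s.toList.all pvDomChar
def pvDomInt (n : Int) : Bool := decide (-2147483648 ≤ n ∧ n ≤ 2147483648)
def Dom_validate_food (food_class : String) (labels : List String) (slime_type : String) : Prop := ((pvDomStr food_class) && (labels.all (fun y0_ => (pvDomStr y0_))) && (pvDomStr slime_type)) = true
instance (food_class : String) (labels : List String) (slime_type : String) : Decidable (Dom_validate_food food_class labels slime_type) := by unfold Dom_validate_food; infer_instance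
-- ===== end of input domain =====

-- B replaces A's if/elif cascade with a table lookup and a REVERSED matching scan:
-- it builds the lowercase label set once, then scans the preference list against it (objective: simpler).
-- ===== PORT A =====
def validate_food (food_class : String) (labels : List String) (slime_type : String) : Bool × String :=
  let acceptable_classes : List String := ["food", "drink", "snack", "beverage"]
  if acceptable_classes.contains (PySem.Str.lower food_class) then
    if slime_type == "scholar" then
      if labels.any (fun label => (["coffee", "tea", "book"] : List String).contains (PySem.Str.lower label)) then
        (true, "The slime happily consumed it while studying!")
      else
        (true, "The slime ate it, though it would prefer coffee or tea.")
    else if slime_type == "glutton" then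
      (true, "The slime devoured it with joy!")
    else if slime_type == "athlete" then
      if labels.any (fun label => (["fruit", "vegetable", "water", "healthy"] : List String).contains (PySem.Str.lower label)) then
        (true, "The slime gratefully ate the healthy snack!")
      else
        (true, "The slime ate it, but prefers healthier options.")
    else
      (true, "The slime happily ate it.")
  else
    (false, "That's not food! The slime looked confused.")

-- ===== PORT B =====
def pvTable : PySem.Dict String (List String × String × String) := PySem.Dict.mk
  [("scholar", (["coffee", "tea", "book"],
                "The slime happily consumed it while studying!",
                "The slime ate it, though it would prefer coffee or tea.")),
   ("glutton", (([] : List String),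
                "The slime devoured it with joy!",
                "The slime devoured it with joy!")),
   ("athlete", (["fruit", "vegetable", "water", "healthy"],
                "The slime gratefully ate the healthy snack!",
                "The slime ate it, but prefers healthier options."))]

def pvWanderer : List String × String × String :=
  (([] : List String), "The slime happily ate it.", "The slime happily ate it.")

def validate_food_alt (food_class : String) (labels : List String) (slime_type : String) : Bool × String :=
  if !(["food", "drink", "snack", "beverage"] : List String).contains (PySem.Str.lower food_class) then
    (false, "That's not food! The slime looked confused.")
  else
    let rec_ := pvTable.getD slime_type pvWanderer
    -- seen = {label.lower() for label in labels}
    let seen : PySem.Set String := PySem.Set.ofList (labels.map PySem.Str.lower)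
    let msg := if rec_.1.any (fun p => PySem.Set.contains seen p) then rec_.2.1 else rec_.2.2
    (true, msg)

-- ===== PRECONDITION & SPEC =====
def Spec_validate_food (food_class : String) (labels : List String) (slime_type : String) (out : Bool × String) : Prop := out = validate_food_alt food_class labels slime_type
instance (food_class : String) (labels : List String) (slime_type : String) (out : Bool × String) : Decidable (Spec_validate_food food_class labels slime_type out) := by unfold Spec_validate_food; infer_instance

-- ===== CLAIM (what is proved, stated in full; the proofs are below) =====
def Claim_equal_validate_food : Prop := ∀ (food_class : String) (labels : List String) (slime_type : String), Dom_validate_food food_class labels slime_type → Spec_validate_food food_class labels slime_type (validate_food food_class labels slime_type)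

-- ===== LEMMAS AND PROOFS =====
-- The two scan directions agree: some preference lies in the set of lowered labels
-- iff some label's lowercase lies in the preference list.
theorem scan_comm (prefs labels : List String) :
    (prefs.any (fun p => PySem.Set.contains (PySem.Set.ofList (labels.map PySem.Str.lower)) p))
    = (labels.any (fun l => prefs.contains (PySem.Str.lower l))) := by
  rw [Bool.eq_iff_iff]
  simp only [List.any_eq_true, PySem.Set.contains_eq_listContains, List.contains_iff_mem,
    PySem.Set.mem_ofList, List.mem_map]
  constructor
  · rintro ⟨p, hp, l, hl, rfl⟩; exact ⟨l, hl, hp⟩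
  · rintro ⟨l, hl, hp⟩; exact ⟨_, hp, l, hl, rfl⟩

-- ===== VERDICT (by name: the statement is the Claim_ definition above) =====
theorem validate_food_spec : Claim_equal_validate_food := by
  intro food_class labels slime_type _
  unfold Spec_validate_food validate_food validate_food_alt
  cases hc : (["food", "drink", "snack", "beverage"] : List String).contains (PySem.Str.lower food_class) with
  | false => simp only [hc, Bool.not_false, Bool.false_eq_true, if_false, if_true]
  | true =>
    simp only [hc, Bool.not_true, Bool.false_eq_true, if_false]
    by_cases hs : slime_type = "scholar"
    · subst hs
      have hrec : pvTable.getD "scholar" pvWanderer =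
          (["coffee", "tea", "book"],
           "The slime happily consumed it while studying!",
           "The slime ate it, though it would prefer coffee or tea.") := rfl
      simp only [hrec, scan_comm, beq_self_eq_true, if_true]
      split_ifs <;> rfl
    · by_cases hg : slime_type = "glutton"
      · subst hg
        have hrec : pvTable.getD "glutton" pvWanderer =
            (([] : List String),
             "The slime devoured it with joy!",
             "The slime devoured it with joy!") := rfl
        have h1 : ("glutton" == "scholar") = false := by decide
        simp only [hrec, h1, beq_self_eq_true, if_true, Bool.false_eq_true,
          if_false, List.any_nil]
      · by_cases ha : slime_type = "athlete"
        · subst ha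
          have hrec : pvTable.getD "athlete" pvWanderer =
              (["fruit", "vegetable", "water", "healthy"],
               "The slime gratefully ate the healthy snack!",
               "The slime ate it, but prefers healthier options.") := rfl
          have h1 : ("athlete" == "scholar") = false := by decide
          have h2 : ("athlete" == "glutton") = false := by decide
          simp only [hrec, h1, h2, scan_comm, beq_self_eq_true, if_true,
            Bool.false_eq_true, if_false]
          split_ifs <;> rfl
        · have h1 : (slime_type == "scholar") = false := by simp [hs]
          have h2 : (slime_type == "glutton") = false := by simp [hg]
          have h3 : (slime_type == "athlete") = false := by simp [ha]
          have g1 : ("scholar" == slime_type) = false := by simp [Ne.symm hs]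
          have g2 : ("glutton" == slime_type) = false := by simp [Ne.symm hg]
          have g3 : ("athlete" == slime_type) = false := by simp [Ne.symm ha]
          have hnone : pvTable.get? slime_type = none := by
            simp only [pvTable, PySem.Dict.get?_mk_cons, g1, g2, g3, Bool.false_eq_true, if_false]
            rfl
          have hrec : pvTable.getD slime_type pvWanderer = pvWanderer := by
            rw [PySem.Dict.getD_eq_get?_getD, hnone]; rfl
          simp only [h1, h2, h3, Bool.false_eq_true, if_false, if_true]
          rw [hrec]
          simp [pvWanderer]
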